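-- pv_equiv track=rewrite | github.com/ahopkins/sanic-jwt | sanic_jwt/validators.py | validate_scopes
-- ===== SOURCE A (Python) =====
-- def validate_single_scope(required, user_scopes, require_all_actions=True):
--     def normalize(scope):
--         """
--         Normalizes and returns tuple consisting of namespace, and action(s)
--         """
--         parts = scope.split(':')
--         return (parts[0], parts[1:])
--
--     required = normalize(required)
--     user_scopes = [normalize(x) for x in user_scopes]
--
--     is_valid = False
--
--     for requested in user_scopes:
--         if required[0]:
--             valid_namespace = required[0] == requested[0]
--         else:
--             valid_namespace = True
--
--         if required[1]:
--             if len(requested[1]) == 0: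
--                 valid_actions = True
--             else:
--                 method = all if require_all_actions else any
--                 valid_actions = method(x in requested[1] for x in required[1])
--         else:
--             valid_actions = len(requested[1]) == 0
--
--         is_valid = all([valid_namespace, valid_actions])
--
--         if is_valid:
--             break
--
--     return is_valid
--
-- def validate_scopes(request, scopes, user_scopes, require_all=True, require_all_actions=True):
--     if not isinstance(scopes, (list, tuple)):
--         scopes = [scopes]
--
--     method = all if require_all else any
--     return method(
--         validate_single_scope(
--             x,
--             user_scopes,
--             require_all_actions=require_all_actions
--         ) for x in scopes
--     )
-- ===== SOURCE B (Python) =====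
-- def validate_scopes(request, scopes, user_scopes, require_all=True, require_all_actions=True):
--     if not isinstance(scopes, (list, tuple)):
--         scopes = [scopes]
--
--     # Invert A's loop nest: normalize the required scopes once, then make a
--     # single pass over user_scopes maintaining a satisfied-flags array.
--     req = []
--     for s in scopes:
--         p = s.split(':')
--         req.append((p[0], p[1:]))
--     sat = [False] * len(req)
--
--     for u in user_scopes:
--         q = u.split(':')
--         uns, uacts = q[0], q[1:]
--         for i, (ns, acts) in enumerate(req):
--             if sat[i]:
--                 continue
--             if ns and ns != uns:
--                 continue
--             if acts:
--                 ok = (not uacts) or (all if require_all_actions else any)(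
--                     a in uacts for a in acts)
--             else:
--                 ok = not uacts
--             if ok:
--                 if not require_all:
--                     return True
--                 sat[i] = True
--
--     return all(sat) if require_all else False
-- ===== Notes on version B (the rewrite author's own statement) =====
-- stated objective: alternative
-- what changed: B inverts A's loop nest: it normalizes the required scopes once and makes a single pass over user_scopes, maintaining a satisfied-flags array (skipping already-satisfied entries and returning early in any-mode), instead of A's per-required-scope rescan and re-split of the whole user_scopes list.
import Mathlib
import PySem

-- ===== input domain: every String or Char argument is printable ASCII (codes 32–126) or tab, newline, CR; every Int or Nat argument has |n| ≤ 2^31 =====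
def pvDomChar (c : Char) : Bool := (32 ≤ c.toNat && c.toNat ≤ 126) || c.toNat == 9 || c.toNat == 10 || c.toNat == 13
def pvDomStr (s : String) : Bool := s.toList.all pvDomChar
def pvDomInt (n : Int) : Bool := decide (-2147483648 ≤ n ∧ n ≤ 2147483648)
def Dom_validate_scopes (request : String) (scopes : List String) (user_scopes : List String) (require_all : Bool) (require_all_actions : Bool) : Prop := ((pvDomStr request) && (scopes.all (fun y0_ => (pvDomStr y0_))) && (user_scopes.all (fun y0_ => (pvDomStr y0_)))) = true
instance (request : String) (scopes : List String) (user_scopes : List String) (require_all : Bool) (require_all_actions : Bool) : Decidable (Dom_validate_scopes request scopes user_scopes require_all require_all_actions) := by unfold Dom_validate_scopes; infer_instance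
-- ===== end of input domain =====

-- B inverts A's loop nest: required scopes are normalized once, then ONE pass over
-- user_scopes updates a satisfied-flags array (skipping already-satisfied entries),
-- instead of A's per-required-scope rescan and re-split of all user scopes.

-- ===== PORT A =====
-- normalize(scope): split on ':', take (parts[0], parts[1:]); split? with ":" ≠ "" is always some,
-- and its result is never [], so headD ""/drop 1 are exact for parts[0]/parts[1:].
def vsNormalize (scope : String) : String × List String :=
  let parts := (PySem.Str.split? scope ":").getD []
  (parts.headD "", parts.drop 1)

-- the for-loop of validate_single_scope, carrying is_valid
def vsLoopA (req : String × List String) (raa : Bool) : List (String × List String) → Bool → Bool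
  | [], is_valid => is_valid
  | r :: rest, _ =>
    let valid_namespace := if req.1 != "" then req.1 == r.1 else true
    let valid_actions :=
      if req.2 != ([] : List String) then
        (if r.2.length == 0 then true
         else if raa then req.2.all (fun x => r.2.contains x)
         else req.2.any (fun x => r.2.contains x))
      else r.2.length == 0
    let is_valid := [valid_namespace, valid_actions].all id
    if is_valid then is_valid else vsLoopA req raa rest is_valid

def validate_single_scope (required : String) (user_scopes : List String) (require_all_actions : Bool) : Bool :=
  vsLoopA (vsNormalize required) require_all_actions (user_scopes.map vsNormalize) false

def validate_scopes (request : String) (scopes : List String) (user_scopes : List String) (require_all : Bool) (require_all_actions : Bool) : Bool :=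
  if require_all then scopes.all (fun x => validate_single_scope x user_scopes require_all_actions)
  else scopes.any (fun x => validate_single_scope x user_scopes require_all_actions)

-- ===== PORT B =====
-- ns, *acts = scope.split(':')  (split? with ":" is always some and never returns [])
def vsSplit (scope : String) : String × List String :=
  match (PySem.Str.split? scope ":").getD [] with
  | ns :: acts => (ns, acts)
  | [] => ("", [])

-- B's inner loop: 'for i, (ns, acts) in enumerate(req)' over one user scope (uns, uacts);
-- enumerate is ported as recursion carrying the index i; 'return True' is the none result.
def vsInnerB (ra raa : Bool) (uns : String) (uacts : List String) :
    List (String × List String) → Nat → List Bool → Option (List Bool)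
  | [], _, sat => some sat
  | (ns, acts) :: rest, i, sat =>
    if sat.getD i false then vsInnerB ra raa uns uacts rest (i+1) sat
    else if ns != "" && ns != uns then vsInnerB ra raa uns uacts rest (i+1) sat
    else
      let ok := if acts != ([] : List String) then
          (uacts.isEmpty || (if raa then acts.all (fun a => uacts.contains a)
                             else acts.any (fun a => uacts.contains a)))
        else uacts.isEmpty
      if ok then
        (if !ra then none else vsInnerB ra raa uns uacts rest (i+1) (sat.set i true))
      else vsInnerB ra raa uns uacts rest (i+1) sat

-- B's outer loop over user_scopes, carrying sat
def vsOuterB (ra raa : Bool) (req : List (String × List String)) :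
    List String → List Bool → Bool
  | [], sat => if ra then sat.all id else false
  | u :: rest, sat =>
    match vsInnerB ra raa (vsSplit u).1 (vsSplit u).2 req 0 sat with
    | none => true
    | some sat' => vsOuterB ra raa req rest sat'

def validate_scopes_alt (request : String) (scopes : List String) (user_scopes : List String) (require_all : Bool) (require_all_actions : Bool) : Bool :=
  let req := scopes.map vsSplit
  vsOuterB require_all require_all_actions req user_scopes (List.replicate req.length false)

-- ===== PRECONDITION & SPEC =====
def Spec_validate_scopes (request : String) (scopes : List String) (user_scopes : List String) (require_all : Bool) (require_all_actions : Bool) (out : Bool) : Prop := out = validate_scopes_alt request scopes user_scopes require_all require_all_actions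
instance (request : String) (scopes : List String) (user_scopes : List String) (require_all : Bool) (require_all_actions : Bool) (out : Bool) : Decidable (Spec_validate_scopes request scopes user_scopes require_all require_all_actions out) := by unfold Spec_validate_scopes; infer_instance

-- ===== CLAIM (what is proved, stated in full; the proofs are below) =====
def Claim_equal_validate_scopes : Prop := ∀ (request : String) (scopes : List String) (user_scopes : List String) (require_all : Bool) (require_all_actions : Bool), Dom_validate_scopes request scopes user_scopes require_all require_all_actions → Spec_validate_scopes request scopes user_scopes require_all require_all_actions (validate_scopes request scopes user_scopes require_all require_all_actions)

-- ===== LEMMAS AND PROOFS =====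

lemma vsNormalize_eq_vsSplit (s : String) : vsNormalize s = vsSplit s := by
  cases h : (PySem.Str.split? s ":").getD [] <;> simp [vsNormalize, vsSplit, h]

-- the per-candidate test A's loop body performs (the loop body's is_valid, verbatim)
def vsMatchA (req : String × List String) (raa : Bool) (r : String × List String) : Bool :=
  let valid_namespace := if req.1 != "" then req.1 == r.1 else true
  let valid_actions :=
    if req.2 != ([] : List String) then
      (if r.2.length == 0 then true
       else if raa then req.2.all (fun x => r.2.contains x)
       else req.2.any (fun x => r.2.contains x))
    else r.2.length == 0
  [valid_namespace, valid_actions].all id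

lemma vsLoopA_cons (req : String × List String) (raa : Bool) (r : String × List String)
    (rest : List (String × List String)) (b : Bool) :
    vsLoopA req raa (r :: rest) b =
      (if vsMatchA req raa r then vsMatchA req raa r else vsLoopA req raa rest (vsMatchA req raa r)) := rfl

lemma vsLoopA_eq_any (req : String × List String) (raa : Bool) (l : List (String × List String)) :
    vsLoopA req raa l false = l.any (vsMatchA req raa) := by
  induction l with
  | nil => simp [vsLoopA]
  | cons r rest ih =>
    rw [vsLoopA_cons]
    cases hm : vsMatchA req raa r <;> simp [hm, ih]

-- B's per-pair test, as its branches compute it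
def vsMatchB (raa : Bool) (uns : String) (uacts : List String) (p : String × List String) : Bool :=
  !(p.1 != "" && p.1 != uns) &&
  (if p.2 != ([] : List String) then
      (uacts.isEmpty || (if raa then p.2.all (fun a => uacts.contains a)
                         else p.2.any (fun a => uacts.contains a)))
    else uacts.isEmpty)

lemma vsMatchA_eq_B (q : String × List String) (raa : Bool) (u : String × List String) :
    vsMatchA q raa u = vsMatchB raa u.1 u.2 q := by
  obtain ⟨ns, acts⟩ := q
  obtain ⟨uns, uacts⟩ := u
  simp only [vsMatchA, vsMatchB, List.all_cons, List.all_nil, id, Bool.and_true]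
  congr 1
  · cases hns : (ns != "") <;> simp [hns, bne, Bool.not_not]
  · cases uacts <;> cases acts <;> simp

-- ra = false: sat (all-false) is never read as true and never modified
lemma vsInnerB_false (raa : Bool) (uns : String) (uacts : List String)
    (req : List (String × List String)) :
    ∀ (i : Nat) (sat : List Bool), (∀ j, sat.getD j false = false) →
    vsInnerB false raa uns uacts req i sat =
      (if req.any (vsMatchB raa uns uacts) then none else some sat) := by
  induction req with
  | nil => intro i sat _; simp [vsInnerB]
  | cons p rest ih =>
    intro i sat hsat
    obtain ⟨ns, acts⟩ := p
    rw [List.any_cons]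
    simp only [vsInnerB, hsat, Bool.false_eq_true, if_false]
    by_cases hns : (ns != "" && ns != uns) = true
    · have hmf : vsMatchB raa uns uacts (ns, acts) = false := by
        simp [vsMatchB, hns]
      rw [if_pos hns, ih (i+1) sat hsat, hmf, Bool.false_or]
    · have hm : vsMatchB raa uns uacts (ns, acts) =
          (if acts != ([] : List String) then
            (uacts.isEmpty || (if raa then acts.all (fun a => uacts.contains a)
                               else acts.any (fun a => uacts.contains a)))
          else uacts.isEmpty) := by
        simp only [vsMatchB]
        rw [Bool.not_eq_true] at hns
        simp [hns]
      rw [if_neg hns]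
      cases hok : (if acts != ([] : List String) then
            (uacts.isEmpty || (if raa then acts.all (fun a => uacts.contains a)
                               else acts.any (fun a => uacts.contains a)))
          else uacts.isEmpty)
      · simp only [Bool.false_eq_true, if_false]
        rw [ih (i+1) sat hsat, hm, hok, Bool.false_or]
      · rw [hm, hok]
        simp

-- ra = true: the pure update B's inner loop performs
def vsUpd (raa : Bool) (uns : String) (uacts : List String) :
    List (String × List String) → Nat → List Bool → List Bool
  | [], _, sat => sat
  | p :: rest, i, sat =>
    vsUpd raa uns uacts rest (i+1)
      (if !(sat.getD i false) && vsMatchB raa uns uacts p then sat.set i true else sat)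

lemma vsInnerB_true (raa : Bool) (uns : String) (uacts : List String)
    (req : List (String × List String)) :
    ∀ (i : Nat) (sat : List Bool),
    vsInnerB true raa uns uacts req i sat = some (vsUpd raa uns uacts req i sat) := by
  induction req with
  | nil => intro i sat; simp [vsInnerB, vsUpd]
  | cons p rest ih =>
    intro i sat
    obtain ⟨ns, acts⟩ := p
    simp only [vsInnerB, vsUpd]
    by_cases hs : sat.getD i false = true
    · rw [if_pos hs, ih]
      have hstep : (if !(sat.getD i false) && vsMatchB raa uns uacts (ns, acts) then sat.set i true else sat) = sat := by
        rw [hs]; simp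
      rw [hstep]
    · have hs0 : sat.getD i false = false := by simpa using hs
      rw [if_neg hs]
      by_cases hns : (ns != "" && ns != uns) = true
      · have hmf : vsMatchB raa uns uacts (ns, acts) = false := by simp [vsMatchB, hns]
        rw [if_pos hns, ih]
        have hstep : (if !(sat.getD i false) && vsMatchB raa uns uacts (ns, acts) then sat.set i true else sat) = sat := by
          simp [hmf]
        rw [hstep]
      · have hm : vsMatchB raa uns uacts (ns, acts) =
            (if acts != ([] : List String) then
              (uacts.isEmpty || (if raa then acts.all (fun a => uacts.contains a)
                                 else acts.any (fun a => uacts.contains a)))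
            else uacts.isEmpty) := by
          simp only [vsMatchB]
          rw [Bool.not_eq_true] at hns
          simp [hns]
        rw [if_neg hns]
        cases hok : (if acts != ([] : List String) then
              (uacts.isEmpty || (if raa then acts.all (fun a => uacts.contains a)
                                 else acts.any (fun a => uacts.contains a)))
            else uacts.isEmpty)
        · simp only [Bool.false_eq_true, if_false]
          rw [ih]
          have hstep : (if !(sat.getD i false) && vsMatchB raa uns uacts (ns, acts) then sat.set i true else sat) = sat := by
            rw [hm, hok]; simp
          rw [hstep]
        · simp only [if_true, Bool.not_true, Bool.false_eq_true, if_false]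
          rw [ih]
          have hstep : (if !(sat.getD i false) && vsMatchB raa uns uacts (ns, acts) then sat.set i true else sat) = sat.set i true := by
            rw [hs0, hm, hok]; simp
          rw [hstep]

lemma vsUpd_length (raa : Bool) (uns : String) (uacts : List String)
    (req : List (String × List String)) :
    ∀ (i : Nat) (sat : List Bool), (vsUpd raa uns uacts req i sat).length = sat.length := by
  induction req with
  | nil => intro i sat; rfl
  | cons p rest ih =>
    intro i sat
    simp only [vsUpd, ih]
    split <;> simp

lemma getDset_self (l : List Bool) (j : Nat) (b : Bool) (h : j < l.length) :
    (l.set j b).getD j false = b := by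
  simp [List.getD, h]

lemma getDset_ne (l : List Bool) (i j : Nat) (b : Bool) (h : i ≠ j) :
    (l.set i b).getD j false = l.getD j false := by
  simp [List.getD, List.getElem?_set_ne h]

lemma vsUpd_getD (raa : Bool) (uns : String) (uacts : List String)
    (req : List (String × List String)) :
    ∀ (i : Nat) (sat : List Bool) (j : Nat), j < sat.length →
    (vsUpd raa uns uacts req i sat).getD j false =
      (sat.getD j false ||
       ((decide (i ≤ j) && decide (j < i + req.length)) &&
        vsMatchB raa uns uacts (req.getD (j - i) ("", [])))) := by
  induction req with
  | nil => intro i sat j hj; simp [vsUpd]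
  | cons p rest ih =>
    intro i sat j hj
    simp only [vsUpd]
    set s' := (if !(sat.getD i false) && vsMatchB raa uns uacts p then sat.set i true else sat) with hs'
    have hlen : j < s'.length := by
      rw [hs']; split <;> simp [hj]
    rw [ih (i+1) s' j hlen]
    by_cases hij : j = i
    · subst hij
      have hrest : (decide (j+1 ≤ j) && decide (j < j+1 + rest.length)) = false := by
        simp
      rw [hrest]
      have hself : s'.getD j false = (sat.getD j false || vsMatchB raa uns uacts p) := by
        rw [hs']
        cases hsat : sat.getD j false
        · cases hmp : vsMatchB raa uns uacts p
          · exact hsat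
          · simpa using getDset_self sat j true hj
        · exact hsat
      rw [hself]
      have hz : j - j = 0 := by omega
      have hc : (decide (j ≤ j) && decide (j < j + (p :: rest).length)) = true := by
        simp
      rw [hz, hc]
      simp
    · have hgj : s'.getD j false = sat.getD j false := by
        rw [hs']; split
        · exact getDset_ne sat i j true (fun he => hij he.symm)
        · rfl
      rw [hgj]
      congr 1
      by_cases hle : i ≤ j
      · have h1 : i + 1 ≤ j := by omega
        have h2 : j - i = (j - (i+1)) + 1 := by omega
        have h3 : (decide (j < i + 1 + rest.length)) = (decide (j < i + (p :: rest).length)) := by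
          by_cases h : j < i + 1 + rest.length
          · simp only [List.length_cons]
            rw [decide_eq_true h, decide_eq_true (by omega)]
          · simp only [List.length_cons]
            rw [decide_eq_false h, decide_eq_false (by omega)]
        rw [decide_eq_true hle, decide_eq_true h1, h2, h3]
        simp
      · have h1 : ¬ (i + 1 ≤ j) := by omega
        rw [decide_eq_false hle, decide_eq_false h1]
        simp

lemma all_congr_mem {α : Type} (l : List α) (f g : α → Bool) (h : ∀ x ∈ l, f x = g x) :
    l.all f = l.all g := by
  induction l with
  | nil => rfl
  | cons a t ih => simp only [List.all_cons, h a (by simp), ih (fun x hx => h x (by simp [hx]))]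

-- result of B's outer loop in the require_all = true mode
lemma vsOuterB_true (raa : Bool) (req : List (String × List String))
    (users : List String) :
    ∀ (sat : List Bool), sat.length = req.length →
    vsOuterB true raa req users sat =
      (List.range req.length).all (fun i =>
        sat.getD i false ||
        users.any (fun u => vsMatchB raa (vsSplit u).1 (vsSplit u).2 (req.getD i ("", [])))) := by
  induction users with
  | nil =>
    intro sat hlen
    simp only [vsOuterB, List.any_nil, Bool.or_false, if_true]
    rw [Bool.eq_iff_iff]
    simp only [List.all_eq_true]
    constructor
    · intro h i hi
      rw [List.mem_range] at hi
      have hi' : i < sat.length := by omega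
      rw [List.getD_eq_getElem sat false hi']
      exact h sat[i] (List.getElem_mem hi')
    · intro h x hx
      obtain ⟨i, hi, rfl⟩ := List.mem_iff_getElem.mp hx
      have := h i (by rw [List.mem_range]; omega)
      rw [List.getD_eq_getElem sat false hi] at this
      simpa using this
  | cons u rest ih =>
    intro sat hlen
    simp only [vsOuterB, vsInnerB_true]
    rw [ih _ (by rw [vsUpd_length]; exact hlen)]
    refine all_congr_mem _ _ _ (fun i hi => ?_)
    rw [List.mem_range] at hi
    rw [vsUpd_getD raa _ _ req 0 sat i (by omega)]
    have h0 : (decide (0 ≤ i) && decide (i < 0 + req.length)) = true := by simp [hi]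
    simp only [h0, Nat.sub_zero, Bool.true_and, List.any_cons]
    cases sat.getD i false <;> cases vsMatchB raa (vsSplit u).1 (vsSplit u).2 (req.getD i ("", [])) <;> simp

-- result of B's outer loop in the require_all = false mode
lemma vsOuterB_false (raa : Bool) (req : List (String × List String))
    (users : List String) :
    ∀ (sat : List Bool), (∀ j, sat.getD j false = false) →
    vsOuterB false raa req users sat =
      users.any (fun u => req.any (vsMatchB raa (vsSplit u).1 (vsSplit u).2)) := by
  induction users with
  | nil => intro sat _; rfl
  | cons u rest ih =>
    intro sat hsat
    simp only [vsOuterB]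
    rw [vsInnerB_false raa _ _ req 0 sat hsat]
    by_cases h : req.any (vsMatchB raa (vsSplit u).1 (vsSplit u).2) = true
    · simp [h]
    · rw [Bool.not_eq_true] at h
      simp [h, ih sat hsat]

lemma replicate_getD_false (n j : Nat) : (List.replicate n false).getD j false = false := by
  simp [List.getD]

-- A's single-scope check in matchB form
lemma vsSingle_eq (x : String) (user_scopes : List String) (raa : Bool) :
    validate_single_scope x user_scopes raa =
      user_scopes.any (fun u => vsMatchB raa (vsSplit u).1 (vsSplit u).2 (vsSplit x)) := by
  simp only [validate_single_scope, vsLoopA_eq_any, vsNormalize_eq_vsSplit, List.any_map]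
  refine List.any_congr rfl (fun u => ?_)
  simp [Function.comp, vsMatchA_eq_B, vsNormalize_eq_vsSplit]

theorem validate_scopes_spec : Claim_equal_validate_scopes := by
  intro request scopes user_scopes require_all raa _
  unfold Spec_validate_scopes validate_scopes validate_scopes_alt
  cases require_all
  · -- any / any: swap the two quantifiers
    rw [if_neg (by decide : ¬ (false = true))]
    rw [vsOuterB_false raa _ user_scopes _ (fun j => replicate_getD_false _ j)]
    simp only [vsSingle_eq, List.any_map]
    rw [Bool.eq_iff_iff]
    simp only [List.any_eq_true]
    constructor
    · rintro ⟨x, hx, u, hu', hm⟩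
      exact ⟨u, hu', x, hx, hm⟩
    · rintro ⟨u, hu, x, hx', hm⟩
      exact ⟨x, hx', u, hu, hm⟩
  · -- all: relate the flags array to per-required-scope matching
    rw [if_pos rfl]
    rw [vsOuterB_true raa _ user_scopes _ (by simp)]
    simp only [replicate_getD_false, Bool.false_or, vsSingle_eq]
    rw [Bool.eq_iff_iff]
    simp only [List.all_eq_true]
    constructor
    · intro h i hi
      rw [List.mem_range, List.length_map] at hi
      have := h scopes[i] (List.getElem_mem hi)
      have hg : (scopes.map vsSplit).getD i ("", []) = vsSplit scopes[i] := by
        rw [List.getD_eq_getElem _ _ (by simpa using hi)]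
        simp
      rw [hg]
      simpa using this
    · intro h x hx
      obtain ⟨i, hi, rfl⟩ := List.mem_iff_getElem.mp hx
      have := h i (by rw [List.mem_range, List.length_map]; exact hi)
      have hg : (scopes.map vsSplit).getD i ("", []) = vsSplit scopes[i] := by
        rw [List.getD_eq_getElem _ _ (by simpa using hi)]
        simp
      rw [hg] at this
      simpa using this
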